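-- pv_equiv track=rewrite | github.com/Leonenkk/AOIS | lab1/main.py | add_in_additional_code
-- ===== SOURCE A (Python) =====
-- def decimal_to_binary(n, bit_length=None):
--     """Перевод неотрицательного целого числа в двоичную строку (без знака)"""
--     if n == 0:
--         return '0'.zfill(bit_length) if bit_length else '0'
--     binary = []
--     while n > 0:
--         binary.append(str(n % 2))
--         n //= 2
--     binary_str = ''.join(reversed(binary))
--     if bit_length:
--         binary_str = binary_str.zfill(bit_length)
--     return binary_str
--
-- def get_positive_code(n, bit_length):
--     """Прямой (знаковый) код для положительного числа.
--        bit_length включает бит знака (старший бит = 0)"""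
--     binary_str = decimal_to_binary(n, bit_length - 1)
--     return '0' + binary_str
--
-- def get_reverse_code(n, bit_length):
--     """Обратный код.
--        Для положительных чисел – тот же прямой код,
--        для отрицательных – инвертируем все разряды величины (но сохраняем знак = 1)."""
--     if n >= 0:
--         return get_positive_code(n, bit_length)
--     pos_code = decimal_to_binary(abs(n), bit_length - 1)
--     pos_code = '0' + pos_code  # знак 0
--     inverted = ''.join('1' if bit == '0' else '0' for bit in pos_code[1:])
--     return '1' + inverted
--
-- def get_additional_code(n, bit_length):
--     """Дополнительный (двоичный) код.
--        Для положительных чисел – прямой код;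
--        для отрицательных – обратный код плюс 1."""
--     if n >= 0:
--         return get_positive_code(n, bit_length)
--     rev = get_reverse_code(n, bit_length)
--     carry = 1
--     additional = []
--     for bit in reversed(rev):
--         total = int(bit) + carry
--         additional.append(str(total % 2))
--         carry = total // 2
--     result = ''.join(reversed(additional))
--     return result[-bit_length:]
--
-- def add_in_additional_code(a, b, bit_length):
--     """Сложение двух чисел в дополнительном коде с фиксированной длиной bit_length.
--        Результат возвращается в виде двоичной строки (дополнительного кода).
--        Для проверки десятичное значение получается с помощью twos_complement_to_decimal()."""
--     a_code = get_additional_code(a, bit_length).zfill(bit_length)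
--     b_code = get_additional_code(b, bit_length).zfill(bit_length)
--     result = []
--     carry = 0
--     for i in range(bit_length - 1, -1, -1):
--         total = int(a_code[i]) + int(b_code[i]) + carry
--         result.append(str(total % 2))
--         carry = total // 2
--     result_str = ''.join(reversed(result))
--     # Если переполнение (выход за bit_length), отбросить старший разряд
--     if len(result_str) > bit_length:
--         result_str = result_str[-bit_length:]
--     return result_str
-- ===== SOURCE B (Python) =====
-- def decimal_to_binary(n, bit_length=None):
--     if n == 0:
--         return '0'.zfill(bit_length) if bit_length else '0'
--     binary = []
--     while n > 0:
--         binary.append(str(n % 2))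
--         n //= 2
--     binary_str = ''.join(reversed(binary))
--     if bit_length:
--         binary_str = binary_str.zfill(bit_length)
--     return binary_str
--
-- def get_positive_code(n, bit_length):
--     binary_str = decimal_to_binary(n, bit_length - 1)
--     return '0' + binary_str
--
-- def get_reverse_code(n, bit_length):
--     if n >= 0:
--         return get_positive_code(n, bit_length)
--     pos_code = decimal_to_binary(abs(n), bit_length - 1)
--     pos_code = '0' + pos_code
--     inverted = ''.join('1' if bit == '0' else '0' for bit in pos_code[1:])
--     return '1' + inverted
--
-- def get_additional_code(n, bit_length):
--     if n >= 0:
--         return get_positive_code(n, bit_length)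
--     rev = get_reverse_code(n, bit_length)
--     carry = 1
--     additional = []
--     for bit in reversed(rev):
--         total = int(bit) + carry
--         additional.append(str(total % 2))
--         carry = total // 2
--     result = ''.join(reversed(additional))
--     return result[-bit_length:]
--
-- def add_in_additional_code(a, b, bit_length):
--     """Add two numbers in two's-complement code of width bit_length.
--        The operand codes are parsed as integers, added, and the sum is
--        reduced modulo 2**bit_length and formatted back to a binary string."""
--     a_code = get_additional_code(a, bit_length).zfill(bit_length)
--     b_code = get_additional_code(b, bit_length).zfill(bit_length)
--     total = int(a_code[:bit_length], 2) + int(b_code[:bit_length], 2)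
--     return bin(total % (1 << bit_length))[2:].zfill(bit_length)
-- ===== Notes on version B (the rewrite author's own statement) =====
-- stated objective: faster
-- what changed: The simulated per-character ripple-carry adder loop is replaced by parsing the two fixed-width code strings as integers (int(s, 2)), adding them with one big-int addition, and formatting the sum modulo 2**bit_length once; Pre_ excludes bit_length <= 0, where B's int('', 2) parse raises ValueError while A's empty loop returns ''.
-- outside the precondition, e.g. on add_in_additional_code(0, 0, 0): A returns '', B raises ValueError; on add_in_additional_code(3, -5, -2): A returns '', B raises ValueError
import Mathlib
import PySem

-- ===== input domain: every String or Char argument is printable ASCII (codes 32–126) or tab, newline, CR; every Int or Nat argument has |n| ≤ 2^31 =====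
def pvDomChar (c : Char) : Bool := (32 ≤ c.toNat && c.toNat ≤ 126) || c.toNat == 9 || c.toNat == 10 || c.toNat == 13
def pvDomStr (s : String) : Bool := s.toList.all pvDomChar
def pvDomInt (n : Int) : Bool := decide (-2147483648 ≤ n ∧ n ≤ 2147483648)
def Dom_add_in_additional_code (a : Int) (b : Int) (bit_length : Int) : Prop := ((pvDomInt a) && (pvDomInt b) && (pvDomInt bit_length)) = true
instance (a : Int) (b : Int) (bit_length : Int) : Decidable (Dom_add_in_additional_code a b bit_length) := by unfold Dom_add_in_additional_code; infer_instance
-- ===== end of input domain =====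

-- B keeps A's helper functions but replaces A's simulated ripple-carry bit-adder loop by
-- parsing the two fixed-width code strings as integers, adding, and formatting the sum
-- modulo 2^bit_length once (measured faster in Python; equivalence proved for bit_length ≥ 1).


-- ===== PORT A =====

-- str(d) for a single decimal digit d (only d ∈ {0,1} ever reaches this helper)
def pvDigit (d : Int) : Char := Char.ofNat (48 + d.toNat)

-- int(c) for a single decimal-digit character (only '0'/'1' ever reach this helper)
def pvCharInt (c : Char) : Int := (c.toNat : Int) - 48

-- the `while n > 0: binary.append(str(n % 2)); n //= 2` loop (digits LSB first)
def pvDtbLoop (n : Nat) : List Char :=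
  if n = 0 then [] else pvDigit ((n % 2 : Nat) : Int) :: pvDtbLoop (n / 2)
decreasing_by exact Nat.div_lt_self (Nat.pos_of_ne_zero (by assumption)) (by omega)

-- decimal_to_binary (bit_length always an int in this call chain; `if bit_length:` = ≠ 0;
-- for n < 0 the while-loop body never runs, matching `n.toNat = 0`)
def pvDecimalToBinary (n : Int) (bl : Int) : List Char :=
  if n = 0 then (if bl ≠ 0 then PySem.Chars.zfill ['0'] bl else ['0'])
  else
    let binary := pvDtbLoop n.toNat
    let binary_str := binary.reverse
    if bl ≠ 0 then PySem.Chars.zfill binary_str bl else binary_str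

def pvGetPositiveCode (n : Int) (bit_length : Int) : List Char :=
  '0' :: pvDecimalToBinary n (bit_length - 1)

def pvGetReverseCode (n : Int) (bit_length : Int) : List Char :=
  if 0 ≤ n then pvGetPositiveCode n bit_length
  else
    let pos_code := '0' :: pvDecimalToBinary |n| (bit_length - 1)
    let inverted := (PySem.List.slice pos_code (some 1) none).map
      (fun bit => if bit = '0' then '1' else '0')
    '1' :: inverted

def pvGetAdditionalCode (n : Int) (bit_length : Int) : List Char :=
  if 0 ≤ n then pvGetPositiveCode n bit_length
  else
    let rev := pvGetReverseCode n bit_length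
    let st := rev.reverse.foldl
      (fun (st : List Char × Int) bit =>
        let total := pvCharInt bit + st.2
        (st.1 ++ [pvDigit (PySem.Int.mod total 2)], PySem.Int.floordiv total 2)) ([], 1)
    let result := st.1.reverse
    PySem.List.slice result (some (-bit_length)) none

def add_in_additional_code (a : Int) (b : Int) (bit_length : Int) : String :=
  let a_code := PySem.Chars.zfill (pvGetAdditionalCode a bit_length) bit_length
  let b_code := PySem.Chars.zfill (pvGetAdditionalCode b bit_length) bit_length
  let st := (PySem.List.pyRange (bit_length - 1) (-1) (-1)).foldl
    (fun (st : List Char × Int) i =>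
      let total := pvCharInt (PySem.List.pyGetD a_code i '0')
                 + pvCharInt (PySem.List.pyGetD b_code i '0') + st.2
      (st.1 ++ [pvDigit (PySem.Int.mod total 2)], PySem.Int.floordiv total 2)) ([], 0)
  let result_str := st.1.reverse
  let result_str :=
    if bit_length < (result_str.length : Int)
    then PySem.List.slice result_str (some (-bit_length)) none
    else result_str
  String.ofList result_str

-- ===== PORT B =====
-- (Source B's helper functions decimal_to_binary/get_positive_code/get_reverse_code/
--  get_additional_code are verbatim A's; their transliterations above are shared.)

-- int(s, 2): exact for the nonempty all-'0'/'1' strings this call chain produces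
def pvParseBin (s : List Char) : Int :=
  s.foldl (fun acc c => 2 * acc + pvCharInt c) 0

-- binary digits of n, LSB first
def pvBinRev (n : Nat) : List Char :=
  if n = 0 then [] else pvDigit ((n % 2 : Nat) : Int) :: pvBinRev (n / 2)
decreasing_by exact Nat.div_lt_self (Nat.pos_of_ne_zero (by assumption)) (by omega)

-- bin(n)[2:] for n ≥ 0
def pvToBin (n : Nat) : List Char :=
  if n = 0 then ['0'] else (pvBinRev n).reverse

def add_in_additional_code_alt (a : Int) (b : Int) (bit_length : Int) : String :=
  let a_code := PySem.Chars.zfill (pvGetAdditionalCode a bit_length) bit_length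
  let b_code := PySem.Chars.zfill (pvGetAdditionalCode b bit_length) bit_length
  let total := pvParseBin (PySem.List.slice a_code none (some bit_length))
             + pvParseBin (PySem.List.slice b_code none (some bit_length))
  -- 1 << bit_length, exact for bit_length ≥ 0 (Pre_ gives bit_length ≥ 1)
  String.ofList (PySem.Chars.zfill (pvToBin (PySem.Int.mod total (2 ^ bit_length.toNat)).toNat) bit_length)

-- ===== PRECONDITION & SPEC =====
-- Pre_ excludes bit_length ≤ 0: there B's int('', 2) parse raises ValueError, while A's
-- empty adder loop returns '' (a degenerate value for a width-less addition).
def Pre_add_in_additional_code (a : Int) (b : Int) (bit_length : Int) : Prop := 1 ≤ bit_length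
instance (a : Int) (b : Int) (bit_length : Int) : Decidable (Pre_add_in_additional_code a b bit_length) := by unfold Pre_add_in_additional_code; infer_instance
def pvWitness_add_in_additional_code : Int × Int × Int := (3, -5, 8)

def Spec_add_in_additional_code (a : Int) (b : Int) (bit_length : Int) (out : String) : Prop := out = add_in_additional_code_alt a b bit_length
instance (a : Int) (b : Int) (bit_length : Int) (out : String) : Decidable (Spec_add_in_additional_code a b bit_length out) := by unfold Spec_add_in_additional_code; infer_instance

-- ===== CLAIM (what is proved, stated in full; the proofs are below) =====
def Claim_equal_add_in_additional_code : Prop := ∀ (a : Int) (b : Int) (bit_length : Int), Dom_add_in_additional_code a b bit_length → Pre_add_in_additional_code a b bit_length → Spec_add_in_additional_code a b bit_length (add_in_additional_code a b bit_length)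

-- ===== LEMMAS AND PROOFS =====

-- digit value of a binary character
def pvDig (c : Char) : Nat := if c = '1' then 1 else 0

-- value of a most-significant-bit-first character list
def pvBv (l : List Char) : Nat := l.foldl (fun a c => 2 * a + pvDig c) 0

-- value of a least-significant-bit-first character list
def pvLv : List Char → Nat
  | [] => 0
  | c :: cs => pvDig c + 2 * pvLv cs

def pvIsBin (l : List Char) : Prop := ∀ c ∈ l, c = '0' ∨ c = '1'

-- fixed-width LSB-first digits of v (truncated modulo 2^j)
def pvLsb : Nat → Nat → List Char
  | 0, _ => []
  | j + 1, v => pvDigit ((v % 2 : Nat) : Int) :: pvLsb j (v / 2)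

-- weighted sum of a list of addends, LSB first
def pvWsum : List Int → Int
  | [] => 0
  | x :: xs => x + 2 * pvWsum xs

-- n.bit_length() for n ≥ 0 (proof-side length measure)
def pvBitLen (n : Nat) : Nat :=
  if n = 0 then 0 else pvBitLen (n / 2) + 1
decreasing_by exact Nat.div_lt_self (Nat.pos_of_ne_zero (by assumption)) (by omega)


theorem pvBv_foldl (l : List Char) (a : Nat) :
    l.foldl (fun a c => 2 * a + pvDig c) a = a * 2 ^ l.length + pvBv l := by
  induction l generalizing a with
  | nil => simp [pvBv]
  | cons c cs ih =>
    simp only [List.foldl_cons, pvBv, List.length_cons]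
    rw [ih, ih (2 * 0 + pvDig c)]
    ring

theorem pvBv_append (s t : List Char) : pvBv (s ++ t) = pvBv s * 2 ^ t.length + pvBv t := by
  simp only [pvBv, List.foldl_append]
  rw [pvBv_foldl]
  rfl

theorem pvBv_cons (c : Char) (l : List Char) : pvBv (c :: l) = pvDig c * 2 ^ l.length + pvBv l := by
  have := pvBv_append [c] l
  simpa [pvBv, pvDig] using this

theorem pvBv_reverse (l : List Char) : pvBv l.reverse = pvLv l := by
  induction l with
  | nil => simp [pvBv, pvLv]
  | cons c cs ih =>
    rw [List.reverse_cons, pvBv_append, ih]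
    simp [pvBv, pvLv, pvDig]
    ring

theorem pvLv_reverse (l : List Char) : pvLv l.reverse = pvBv l := by
  have := pvBv_reverse l.reverse
  simpa using this.symm

theorem pvZfill_pad (cs : List Char) (w : Int) (h : pvIsBin cs) :
    PySem.Chars.zfill cs w = List.replicate (w.toNat - cs.length) '0' ++ cs := by
  unfold PySem.Chars.zfill
  split
  · next hle =>
    have : w.toNat - cs.length = 0 := by omega
    rw [this]
    simp
  · next hgt =>
    match cs with
    | [] => simp
    | c :: rest =>
      have hc := h c (by simp)
      have : ¬ (c = '+' ∨ c = '-') := by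
        rcases hc with h0 | h0 <;> subst h0 <;> simp
      simp only [this, if_false]

theorem pvZfill_of_le (cs : List Char) (w : Int) (h : w ≤ (cs.length : Int)) :
    PySem.Chars.zfill cs w = cs := by
  unfold PySem.Chars.zfill
  rw [if_pos h]


theorem pvLength_binRev (m : Nat) : (pvBinRev m).length = pvBitLen m := by
  induction m using Nat.strong_induction_on with
  | _ m ih =>
    rw [pvBinRev, pvBitLen]
    split
    · simp
    · next h =>
      simp only [List.length_cons]
      rw [ih (m / 2) (Nat.div_lt_self (Nat.pos_of_ne_zero h) (by omega))]


theorem pvIsBin_binRev (m : Nat) : pvIsBin (pvBinRev m) := by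
  induction m using Nat.strong_induction_on with
  | _ m ih =>
    rw [pvBinRev]
    split
    · intro c hc; simp at hc
    · next h =>
      intro c hc
      rcases List.mem_cons.mp hc with hc | hc
      · subst hc
        have h2 : m % 2 = 0 ∨ m % 2 = 1 := by omega
        rcases h2 with h2 | h2 <;> rw [h2] <;> simp [pvDigit]
      · exact ih (m / 2) (Nat.div_lt_self (Nat.pos_of_ne_zero h) (by omega)) c hc

theorem pvIsBin_toBin (m : Nat) : pvIsBin (pvToBin m) := by
  unfold pvToBin
  split
  · intro c hc; simp at hc; simp [hc]
  · intro c hc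
    exact pvIsBin_binRev m c (List.mem_reverse.mp hc)



theorem pvDtbLoop_eq_binRev (m : Nat) : pvDtbLoop m = pvBinRev m := by
  induction m using Nat.strong_induction_on with
  | _ m ih =>
    rw [pvDtbLoop, pvBinRev]
    split
    · rfl
    · next h =>
      rw [ih (m / 2) (Nat.div_lt_self (Nat.pos_of_ne_zero h) (by omega))]

theorem pvCharInt_eq_dig (c : Char) (h : c = '0' ∨ c = '1') : pvCharInt c = (pvDig c : Int) := by
  rcases h with h | h <;> subst h <;> simp [pvCharInt, pvDig]

theorem pvDtb_eq (n : Int) (bl : Int) (h : 0 ≤ n) :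
    pvDecimalToBinary n bl = PySem.Chars.zfill (pvToBin n.toNat) bl := by
  unfold pvDecimalToBinary
  split
  · next h0 =>
    subst h0
    have : pvToBin (0 : Int).toNat = ['0'] := by rfl
    rw [this]
    split
    · rfl
    · next hbl =>
      have : bl = 0 := by omega
      subst this
      rw [pvZfill_of_le]
      simp
  · next h0 =>
    have hnz : n.toNat ≠ 0 := by omega
    simp only []
    rw [pvDtbLoop_eq_binRev]
    have : pvToBin n.toNat = (pvBinRev n.toNat).reverse := by rw [pvToBin, if_neg hnz]
    rw [← this]
    split
    · rfl
    · next hbl =>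
      have : bl = 0 := by omega
      subst this
      rw [pvZfill_of_le]
      exact Int.natCast_nonneg _

theorem pvWsum_nonneg (l : List Int) (h : ∀ x ∈ l, 0 ≤ x) : 0 ≤ pvWsum l := by
  induction l with
  | nil => simp [pvWsum]
  | cons x xs ih =>
    have h1 := h x (by simp)
    have h2 := ih (fun y hy => h y (by simp [hy]))
    simp only [pvWsum]
    omega

theorem pvWsum_map_add {α : Type} (F G : α → Int) (l : List α) :
    pvWsum (l.map (fun i => F i + G i)) = pvWsum (l.map F) + pvWsum (l.map G) := by
  induction l with
  | nil => simp [pvWsum]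
  | cons x xs ih =>
    simp only [List.map_cons, pvWsum]
    rw [ih]
    ring

theorem pvWsum_charInt (u : List Char) (h : pvIsBin u) :
    pvWsum (u.map pvCharInt) = (pvLv u : Int) := by
  induction u with
  | nil => simp [pvWsum, pvLv]
  | cons c cs ih =>
    simp only [List.map_cons, pvWsum, pvLv]
    rw [ih (fun y hy => h y (by simp [hy])), pvCharInt_eq_dig c (h c (by simp))]
    push_cast
    ring

theorem pvMap_range_getD (l : List Char) (j : Nat) (d : Char) (h : j ≤ l.length) :
    (List.range j).map (fun k => l.getD (j - 1 - k) d) = (l.take j).reverse := by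
  induction j generalizing l with
  | zero => simp
  | succ j ih =>
    rw [List.range_succ_eq_map, List.map_cons, List.map_map]
    have h1 : (fun k => l.getD (j + 1 - 1 - k) d) ∘ Nat.succ = fun k => l.getD (j - 1 - k) d := by
      funext k
      simp only [Function.comp]
      congr 1
      omega
    rw [h1, ih l (by omega)]
    have hj : j < l.length := by omega
    have h2 : l.take (j + 1) = l.take j ++ [l.getD j d] := by
      rw [List.take_add_one]
      congr 1
      rw [List.getD_eq_getElem l d hj]
      simp [List.getElem?_eq_getElem hj]
    rw [h2, List.reverse_append]
    simp

theorem pvLength_lsb (j V : Nat) : (pvLsb j V).length = j := by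
  induction j generalizing V with
  | zero => simp [pvLsb]
  | succ j ih => simp [pvLsb, ih]

theorem pvIsBin_lsb (j V : Nat) : pvIsBin (pvLsb j V) := by
  induction j generalizing V with
  | zero => intro c hc; simp [pvLsb] at hc
  | succ j ih =>
    intro c hc
    simp only [pvLsb] at hc
    rcases List.mem_cons.mp hc with hc | hc
    · subst hc
      have h2 : V % 2 = 0 ∨ V % 2 = 1 := by omega
      rcases h2 with h2 | h2 <;> rw [h2] <;> simp [pvDigit]
    · exact ih (V / 2) c hc

theorem pvLsb_eq (j V : Nat) :
    pvLsb j V = pvBinRev (V % 2 ^ j) ++ List.replicate (j - pvBitLen (V % 2 ^ j)) '0' := by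
  induction j generalizing V with
  | zero => simp [pvLsb, Nat.mod_one, pvBinRev, pvBitLen]
  | succ j ih =>
    have hmod2 : V % 2 ^ (j + 1) % 2 = V % 2 := Nat.mod_mod_of_dvd V (by
      rw [pow_succ]; exact dvd_mul_left 2 (2 ^ j))
    have hdiv : V % 2 ^ (j + 1) / 2 = V / 2 % 2 ^ j := by
      have h1 := Nat.mod_mul_right_div_self V 2 (2 ^ j)
      have h3 : 2 * 2 ^ j = 2 ^ (j + 1) := by ring
      rw [h3] at h1
      exact h1
    by_cases hz : V % 2 ^ (j + 1) = 0
    · have hz2 : V % 2 = 0 := by rw [← hmod2, hz]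
      have hzdiv : V / 2 % 2 ^ j = 0 := by rw [← hdiv, hz]
      have hbr : pvBinRev (V % 2 ^ (j + 1)) = [] := by
        rw [hz, pvBinRev]; rfl
      have hbl : pvBitLen (V % 2 ^ (j + 1)) = 0 := by
        rw [hz, pvBitLen]; rfl
      rw [hbr, hbl]
      simp only [List.nil_append, Nat.sub_zero]
      have htl : pvLsb j (V / 2) = List.replicate j '0' := by
        rw [ih, hzdiv]
        have hbr0 : pvBinRev 0 = [] := by rw [pvBinRev]; rfl
        have hbl0 : pvBitLen 0 = 0 := by rw [pvBitLen]; rfl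
        rw [hbr0, hbl0]
        simp
      simp only [pvLsb, htl, hz2]
      have : pvDigit ((0 : Nat) : Int) = '0' := rfl
      rw [this, List.replicate_succ]
    · have hbr : pvBinRev (V % 2 ^ (j + 1)) =
          pvDigit ((V % 2 : Nat) : Int) :: pvBinRev (V / 2 % 2 ^ j) := by
        rw [pvBinRev, if_neg hz, hmod2, hdiv]
      have hbl : pvBitLen (V % 2 ^ (j + 1)) = pvBitLen (V / 2 % 2 ^ j) + 1 := by
        rw [pvBitLen, if_neg hz, hdiv]
      have hcnt : j + 1 - pvBitLen (V % 2 ^ (j + 1)) = j - pvBitLen (V / 2 % 2 ^ j) := by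
        rw [hbl]; omega
      rw [hbr, hcnt]
      simp only [pvLsb, List.cons_append]
      rw [ih]

theorem pvPad (j V : Nat) (h : 1 ≤ j) :
    (pvLsb j V).reverse = PySem.Chars.zfill (pvToBin (V % 2 ^ j)) (j : Int) := by
  rw [pvLsb_eq, List.reverse_append, List.reverse_replicate]
  by_cases hz : V % 2 ^ j = 0
  · rw [hz]
    have h1 : pvToBin 0 = ['0'] := rfl
    have h2 : pvBinRev 0 = [] := by rw [pvBinRev]; rfl
    have h3 : pvBitLen 0 = 0 := by rw [pvBitLen]; rfl
    rw [h1, h2, h3]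
    rw [pvZfill_pad _ _ (by intro c hc; simp at hc; simp [hc])]
    simp only [List.reverse_nil, Nat.sub_zero, List.length_singleton, List.append_nil]
    rw [← List.replicate_succ']
    congr 1
    omega
  · have h1 : pvToBin (V % 2 ^ j) = (pvBinRev (V % 2 ^ j)).reverse := by
      rw [pvToBin, if_neg hz]
    rw [pvZfill_pad _ _ (pvIsBin_toBin _), h1, List.length_reverse, pvLength_binRev]
    simp

theorem pvEmit_fold {α : Type} (F : α → Int) (l : List α) (hF : ∀ x ∈ l, 0 ≤ F x) :
    ∀ (acc : List Char) (c : Int), 0 ≤ c →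
    ∃ c', l.foldl (fun (st : List Char × Int) x =>
        (st.1 ++ [pvDigit (PySem.Int.mod (F x + st.2) 2)], PySem.Int.floordiv (F x + st.2) 2)) (acc, c)
      = (acc ++ pvLsb l.length ((pvWsum (l.map F) + c).toNat), c') := by
  induction l with
  | nil =>
    intro acc c hc
    exact ⟨c, by simp [pvLsb]⟩
  | cons x xs ih =>
    intro acc c hc
    have hx : 0 ≤ F x := hF x (by simp)
    have hw : 0 ≤ pvWsum (xs.map F) := pvWsum_nonneg _ (by
      intro y hy
      rcases List.mem_map.mp hy with ⟨z, hz, rfl⟩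
      exact hF z (by simp [hz]))
    simp only [List.foldl_cons, List.map_cons, pvWsum, List.length_cons]
    have hmod : PySem.Int.mod (F x + c) 2 = (F x + c) % 2 := by
      rw [PySem.Int.mod, Int.fmod_eq_emod]
      simp
    have hdiv : PySem.Int.floordiv (F x + c) 2 = (F x + c) / 2 := by
      rw [PySem.Int.floordiv]
      exact Int.fdiv_eq_ediv_of_nonneg _ (by omega)
    rw [hmod, hdiv]
    have hc2 : 0 ≤ (F x + c) / 2 := by positivity
    obtain ⟨c', hc'⟩ := ih (fun z hz => hF z (by simp [hz]))
      (acc ++ [pvDigit ((F x + c) % 2)]) ((F x + c) / 2) hc2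
    refine ⟨c', ?_⟩
    rw [hc']
    have hVd : pvDigit ((F x + c) % 2) =
        pvDigit ((((F x + 2 * pvWsum (xs.map F) + c).toNat % 2 : Nat) : Int)) := by
      congr 1
      omega
    have hVq : (F x + 2 * pvWsum (xs.map F) + c).toNat / 2 =
        (pvWsum (xs.map F) + (F x + c) / 2).toNat := by
      omega
    rw [pvLsb, ← hVq, ← hVd]
    simp

theorem pvIsBin_zfill (cs : List Char) (w : Int) (h : pvIsBin cs) :
    pvIsBin (PySem.Chars.zfill cs w) := by
  rw [pvZfill_pad cs w h]
  intro c hc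
  rcases List.mem_append.mp hc with hc | hc
  · left; exact List.eq_of_mem_replicate hc
  · exact h c hc

theorem pvCharInt_nonneg (c : Char) (h : c = '0' ∨ c = '1') : 0 ≤ pvCharInt c := by
  rcases h with h | h <;> subst h <;> simp [pvCharInt]

theorem pvCode_pos (n L : Int) (hL : 1 ≤ L) (hn : 0 ≤ n) :
    PySem.Chars.zfill (pvGetAdditionalCode n L) L
      = '0' :: PySem.Chars.zfill (pvToBin n.toNat) (L - 1) := by
  rw [pvGetAdditionalCode, if_pos hn, pvGetPositiveCode, pvDtb_eq n (L-1) hn]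
  apply pvZfill_of_le
  have h1 := PySem.Chars.length_zfill (pvToBin n.toNat) (L - 1)
  simp only [List.length_cons]
  omega

-- the zero-filled additional code: at least bit_length characters, all binary
theorem pvCodeOk (n L : Int) (hL : 1 ≤ L) :
    L.toNat ≤ (PySem.Chars.zfill (pvGetAdditionalCode n L) L).length ∧
    pvIsBin (PySem.Chars.zfill (pvGetAdditionalCode n L) L) := by
  by_cases hn : 0 ≤ n
  · rw [pvCode_pos n L hL hn]
    set t := pvToBin n.toNat with ht
    refine ⟨?_, ?_⟩
    · simp only [List.length_cons, PySem.Chars.length_zfill]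
      omega
    · intro c hc
      rcases List.mem_cons.mp hc with hc | hc
      · left; exact hc
      · exact pvIsBin_zfill t (L - 1) (pvIsBin_toBin _) c hc
  · have habs : |n| = -n := abs_of_neg (by omega)
    set M := (-n).toNat with hMdef
    have hMn : ((M : Nat) : Int) = -n := Int.toNat_of_nonneg (by omega)
    set t := pvToBin M with ht
    have hbt : pvIsBin t := pvIsBin_toBin _
    set z := PySem.Chars.zfill t (L - 1) with hz
    have hbz : pvIsBin z := pvIsBin_zfill t (L - 1) hbt
    have hzlen : z.length = max t.length (L - 1).toNat := by rw [hz, PySem.Chars.length_zfill]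
    have hrev : pvGetReverseCode n L
        = '1' :: z.map (fun bit => if bit = '0' then '1' else '0') := by
      rw [pvGetReverseCode, if_neg hn]
      simp only [habs, ← hMn, pvDtb_eq (M : Int) (L - 1) (by positivity), Int.toNat_natCast, ← ht,
        ← hz, PySem.List.slice_from_one, List.tail_cons]
    have hbrev : pvIsBin ('1' :: z.map (fun bit => if bit = '0' then '1' else '0')) := by
      intro c hc
      rcases List.mem_cons.mp hc with hc | hc
      · right; exact hc
      · rcases List.mem_map.mp hc with ⟨y, _, rfl⟩
        split <;> simp
    obtain ⟨c', hst⟩ := pvEmit_fold pvCharInt ('1' :: z.map (fun bit => if bit = '0' then '1' else '0')).reverse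
      (by
        intro x hx
        exact pvCharInt_nonneg x (hbrev x (List.mem_reverse.mp hx)))
      [] 1 (by norm_num)
    set P := z.length + 1 with hP
    set V := ((pvWsum ((('1' :: z.map (fun bit => if bit = '0' then '1' else '0')).reverse).map pvCharInt)) + 1).toNat with hV
    have hcode : pvGetAdditionalCode n L
        = ((pvLsb P V).reverse).drop (P - L.toNat) := by
      rw [pvGetAdditionalCode, if_neg hn, hrev]
      simp only [hst, List.nil_append, List.length_reverse, List.length_cons,
        List.length_map, ← hP]
      rw [PySem.List.slice_some_none]
      congr 1
      have hLL : -L = -((L.toNat : Nat) : Int) := by omega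
      rw [hLL, PySem.List.clampIdx_neg_natCast _ _ (by omega)]
      simp [pvLength_lsb]
    have hlenP : L.toNat ≤ P := by rw [hP, hzlen]; omega
    have hcl : (((pvLsb P V).reverse).drop (P - L.toNat)).length = L.toNat := by
      simp [pvLength_lsb]
      omega
    have hzfill : PySem.Chars.zfill (pvGetAdditionalCode n L) L = pvGetAdditionalCode n L := by
      apply pvZfill_of_le
      rw [hcode, hcl]
      omega
    rw [hzfill, hcode]
    refine ⟨by rw [hcl], ?_⟩
    intro c hc
    have hc2 := List.mem_of_mem_drop hc
    exact pvIsBin_lsb P V c (List.mem_reverse.mp hc2)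

-- int(s, 2) equals the bit value for binary strings
theorem pvParseBin_foldl (l : List Char) (a : Int) (h : pvIsBin l) :
    l.foldl (fun acc c => 2 * acc + pvCharInt c) a = a * 2 ^ l.length + (pvBv l : Int) := by
  induction l generalizing a with
  | nil => simp [pvBv]
  | cons c cs ih =>
    simp only [List.foldl_cons, List.length_cons]
    rw [ih _ (fun y hy => h y (by simp [hy])), pvBv_cons, pvCharInt_eq_dig c (h c (by simp))]
    push_cast
    ring

theorem pvParseBin_eq (l : List Char) (h : pvIsBin l) : pvParseBin l = (pvBv l : Int) := by
  rw [pvParseBin, pvParseBin_foldl l 0 h]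
  simp

-- fold value of one operand's contribution in the main loop
theorem pvLoopSum (X : List Char) (L : Int)
    (hlen : L.toNat ≤ X.length) :
    (List.range L.toNat).map (fun k => pvCharInt (X.getD (L.toNat - 1 - k) '0'))
      = ((X.take L.toNat).reverse).map pvCharInt := by
  rw [← pvMap_range_getD X L.toNat '0' hlen, List.map_map]
  rfl

theorem pvLoopVal (X : List Char) (L : Int)
    (hbin : pvIsBin X) :
    pvWsum ((((X.take L.toNat).reverse).map pvCharInt)) = ((pvBv (X.take L.toNat) : Nat) : Int) := by
  rw [pvWsum_charInt _ (by
    intro c hc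
    exact hbin c (List.mem_of_mem_take (List.mem_reverse.mp hc))), pvLv_reverse]

-- ===== VERDICT (by name: the statement is the Claim_ definition above) =====
theorem add_in_additional_code_spec : Claim_equal_add_in_additional_code := by
  unfold Claim_equal_add_in_additional_code Spec_add_in_additional_code
  intro a b L _ hL
  have hL' : 1 ≤ L.toNat := by unfold Pre_add_in_additional_code at hL; omega
  have hL1 : 1 ≤ L := hL
  obtain ⟨hlenA, hbinA⟩ := pvCodeOk a L hL1
  obtain ⟨hlenB, hbinB⟩ := pvCodeOk b L hL1
  set XA := PySem.Chars.zfill (pvGetAdditionalCode a L) L with hXA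
  set XB := PySem.Chars.zfill (pvGetAdditionalCode b L) L with hXB
  set x := pvBv (XA.take L.toNat) with hx
  set y := pvBv (XB.take L.toNat) with hy
  simp only [add_in_additional_code, add_in_additional_code_alt, ← hXA, ← hXB]
  -- the A side: characterize the ripple-carry fold
  have hmem : ∀ i ∈ PySem.List.pyRange (L - 1) (-1) (-1),
      0 ≤ pvCharInt (PySem.List.pyGetD XA i '0') + pvCharInt (PySem.List.pyGetD XB i '0') := by
    intro i hi
    rw [PySem.List.mem_pyRange_neg_one] at hi
    have hiA : PySem.List.pyGetD XA i '0' ∈ XA := by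
      rw [PySem.List.pyGetD_eq_getElem XA '0' (by omega) (by omega)]
      exact List.getElem_mem _
    have hiB : PySem.List.pyGetD XB i '0' ∈ XB := by
      rw [PySem.List.pyGetD_eq_getElem XB '0' (by omega) (by omega)]
      exact List.getElem_mem _
    have h1 := pvCharInt_nonneg _ (hbinA _ hiA)
    have h2 := pvCharInt_nonneg _ (hbinB _ hiB)
    omega
  obtain ⟨c', hst⟩ := pvEmit_fold
    (fun i => pvCharInt (PySem.List.pyGetD XA i '0') + pvCharInt (PySem.List.pyGetD XB i '0'))
    (PySem.List.pyRange (L - 1) (-1) (-1)) hmem [] 0 le_rfl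
  rw [hst]
  have hrlen : (PySem.List.pyRange (L - 1) (-1) (-1)).length = L.toNat := by
    rw [PySem.List.pyRange_neg_one]
    simp
  have hmap : (PySem.List.pyRange (L - 1) (-1) (-1)).map
      (fun i => pvCharInt (PySem.List.pyGetD XA i '0') + pvCharInt (PySem.List.pyGetD XB i '0'))
      = (List.range L.toNat).map
        (fun k => pvCharInt (XA.getD (L.toNat - 1 - k) '0') + pvCharInt (XB.getD (L.toNat - 1 - k) '0')) := by
    rw [PySem.List.pyRange_neg_one]
    have hcnt : (L - 1 - (-1)).toNat = L.toNat := by omega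
    rw [hcnt, List.map_map]
    apply List.map_congr_left
    intro k hk
    rw [List.mem_range] at hk
    have hidx : L - 1 - (k : Int) = ((L.toNat - 1 - k : Nat) : Int) := by omega
    simp only [Function.comp, hidx, PySem.List.pyGetD_natCast]
  have hw : pvWsum ((PySem.List.pyRange (L - 1) (-1) (-1)).map
      (fun i => pvCharInt (PySem.List.pyGetD XA i '0') + pvCharInt (PySem.List.pyGetD XB i '0')))
      = ((x : Nat) : Int) + ((y : Nat) : Int) := by
    rw [hmap, pvWsum_map_add, pvLoopSum XA L hlenA, pvLoopSum XB L hlenB,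
      pvLoopVal XA L hbinA, pvLoopVal XB L hbinB]
  rw [hrlen, hw]
  have hVnat : (((x : Nat) : Int) + ((y : Nat) : Int) + 0).toNat = x + y := by omega
  rw [hVnat]
  have hreslen : ¬ (L < (((pvLsb L.toNat (x + y)).reverse).length : Int)) := by
    rw [List.length_reverse, pvLength_lsb]
    omega
  simp only [List.nil_append, if_neg hreslen]
  rw [pvPad L.toNat (x + y) hL']
  -- the B side: the slices are the same string prefixes the loop read
  have hsliceA : PySem.List.slice XA none (some L) = XA.take L.toNat :=
    PySem.List.slice_to XA (by omega)
  have hsliceB : PySem.List.slice XB none (some L) = XB.take L.toNat :=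
    PySem.List.slice_to XB (by omega)
  rw [hsliceA, hsliceB,
    pvParseBin_eq _ (fun c hc => hbinA c (List.mem_of_mem_take hc)),
    pvParseBin_eq _ (fun c hc => hbinB c (List.mem_of_mem_take hc)), ← hx, ← hy]
  have htot : PySem.Int.mod (((x : Nat) : Int) + ((y : Nat) : Int)) (2 ^ L.toNat)
      = (((x + y) % 2 ^ L.toNat : Nat) : Int) := by
    rw [PySem.Int.mod, Int.fmod_eq_emod,
      if_pos (Or.inl (by positivity : (0:Int) ≤ 2 ^ L.toNat))]
    push_cast
    ring
  rw [htot]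
  congr 2
  all_goals omega
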